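-- pv_equiv track=rewrite | github.com/Geology-cat/WMO-Internal-Cloud-Atlas | build.py | strip_header_menu
-- ===== SOURCE A (Python) =====
-- def strip_header_menu(md_text: str) -> str:
--     """index.md 特有のヘッダーメニュー部分(---で囲まれた領域)を除去する"""
--     result = []
--     in_menu = False
--     hr_count = 0
--     for line in md_text.splitlines(True):
--         stripped = line.strip()
--         if stripped.startswith("---") or stripped.startswith("-----"):
--             hr_count += 1
--             if hr_count == 1:
--                 in_menu = True
--                 continue
--             elif hr_count == 2:
--                 in_menu = False
--                 continue
--         if not in_menu:
--             result.append(line)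
--     return "".join(result)
-- ===== SOURCE B (Python) =====
-- def strip_header_menu(md_text: str) -> str:
--     """index.md 特有のヘッダーメニュー部分(---で囲まれた領域)を除去する"""
--     lines = md_text.splitlines(True)
--     def is_delim(line):
--         return line.strip().startswith("---")
--     first = next((i for i, l in enumerate(lines) if is_delim(l)), None)
--     if first is None:
--         return "".join(lines)
--     second = next((j for j in range(first + 1, len(lines)) if is_delim(lines[j])), None)
--     if second is None:
--         return "".join(lines[:first])
--     return "".join(lines[:first] + lines[second + 1:])
-- ===== Notes on version B (the rewrite author's own statement) =====
-- stated objective: alternative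
-- what changed: Replaced A's stateful single pass (in_menu flag + hr_count counter) with a find-two-delimiter-indices-then-slice decomposition over the keepends line list.
import Mathlib
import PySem

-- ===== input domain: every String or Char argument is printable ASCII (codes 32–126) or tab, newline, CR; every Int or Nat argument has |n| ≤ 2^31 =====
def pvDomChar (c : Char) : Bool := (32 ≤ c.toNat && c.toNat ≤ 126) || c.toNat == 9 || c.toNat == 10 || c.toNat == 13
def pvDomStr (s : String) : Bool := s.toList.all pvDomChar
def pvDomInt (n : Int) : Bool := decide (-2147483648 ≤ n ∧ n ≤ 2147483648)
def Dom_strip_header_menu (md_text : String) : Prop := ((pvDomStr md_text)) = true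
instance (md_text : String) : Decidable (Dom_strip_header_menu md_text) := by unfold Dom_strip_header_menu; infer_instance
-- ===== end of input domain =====

-- B replaces A's stateful in_menu/hr_count single pass by find-the-two-delimiter-indices-then-slice (alternative decomposition, same cost).

-- Hand port of str.splitlines(keepends=True): PySem carries only the keepends=False form.
-- Exact on the stated domain (printable ASCII + tab/newline/CR): the only line
-- boundaries occurring there are '\n', '\r' and '\r\n', which CPython treats as below.
def pySplitlinesKeep : List Char → List (List Char)
  | [] => []
  | '\r' :: '\n' :: rest => ['\r', '\n'] :: pySplitlinesKeep rest
  | '\r' :: rest => ['\r'] :: pySplitlinesKeep rest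
  | '\n' :: rest => ['\n'] :: pySplitlinesKeep rest
  | c :: rest =>
    match pySplitlinesKeep rest with
    | [] => [[c]]
    | l :: ls => (c :: l) :: ls

-- ===== PORT A =====
def strip_header_menu (md_text : String) : String :=
  let st := (pySplitlinesKeep md_text.toList).foldl
    (fun (st : List (List Char) × Bool × Int) line =>
      let stripped := PySem.Chars.strip line
      if PySem.Chars.startswith stripped "---".toList
          || PySem.Chars.startswith stripped "-----".toList then
        let hr := st.2.2 + 1
        if hr = 1 then (st.1, true, hr)
        else if hr = 2 then (st.1, false, hr)
        else if !st.2.1 then (st.1 ++ [line], st.2.1, hr) else (st.1, st.2.1, hr)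
      else
        if !st.2.1 then (st.1 ++ [line], st.2.1, st.2.2) else (st.1, st.2.1, st.2.2))
    ([], false, 0)
  String.mk (PySem.Chars.join [] st.1)

-- ===== PORT B =====
def pyIsDelim (line : List Char) : Bool :=
  PySem.Chars.startswith (PySem.Chars.strip line) "---".toList

def strip_header_menu_alt (md_text : String) : String :=
  let lines := pySplitlinesKeep md_text.toList
  match List.findIdx? pyIsDelim lines with
  | none => String.mk (PySem.Chars.join [] lines)
  | some i =>
    match List.findIdx? pyIsDelim (lines.drop (i + 1)) with
    | none => String.mk (PySem.Chars.join [] (lines.take i))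
    | some k =>
      String.mk (PySem.Chars.join [] (lines.take i ++ lines.drop (i + 1 + k + 1)))

-- ===== PRECONDITION & SPEC =====
def Spec_strip_header_menu (md_text : String) (out : String) : Prop := out = strip_header_menu_alt md_text
instance (md_text : String) (out : String) : Decidable (Spec_strip_header_menu md_text out) := by unfold Spec_strip_header_menu; infer_instance

-- ===== CLAIM (what is proved, stated in full; the proofs are below) =====
def Claim_equal_strip_header_menu : Prop := ∀ (md_text : String), Dom_strip_header_menu md_text → Spec_strip_header_menu md_text (strip_header_menu md_text)

-- ===== LEMMAS AND PROOFS =====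

-- Reference: the surviving lines, by structural recursion (proof-only helper).
def refAfter : List (List Char) → List (List Char)
  | [] => []
  | l :: ls => if pyIsDelim l then ls else refAfter ls

def refBefore : List (List Char) → List (List Char)
  | [] => []
  | l :: ls => if pyIsDelim l then refAfter ls else l :: refBefore ls

-- A's delimiter test equals B's (the "-----" disjunct is subsumed by "---").
lemma delim_eq (line : List Char) :
    (PySem.Chars.startswith (PySem.Chars.strip line) "---".toList
      || PySem.Chars.startswith (PySem.Chars.strip line) "-----".toList) = pyIsDelim line := by
  unfold pyIsDelim
  cases h : PySem.Chars.startswith (PySem.Chars.strip line) "---".toList with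
  | true => simp
  | false =>
    rw [Bool.false_or]
    cases h5 : PySem.Chars.startswith (PySem.Chars.strip line) "-----".toList with
    | false => rfl
    | true =>
      have h3 : ("---".toList : List Char) <+: PySem.Chars.strip line :=
        List.IsPrefix.trans (show ("---".toList : List Char) <+: "-----".toList by decide)
          ((PySem.Chars.startswith_iff _ _).mp h5)
      rw [← PySem.Chars.startswith_iff] at h3
      exact absurd (show PySem.Chars.startswith (PySem.Chars.strip line) "---".toList = true from h3)
        (by simpa using h)

-- A's loop body, without lets (definitionally equal to the port's lambda).
def stepA (st : List (List Char) × Bool × Int) (line : List Char) :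
    List (List Char) × Bool × Int :=
  if PySem.Chars.startswith (PySem.Chars.strip line) "---".toList
      || PySem.Chars.startswith (PySem.Chars.strip line) "-----".toList then
    if st.2.2 + 1 = 1 then (st.1, true, st.2.2 + 1)
    else if st.2.2 + 1 = 2 then (st.1, false, st.2.2 + 1)
    else if !st.2.1 then (st.1 ++ [line], st.2.1, st.2.2 + 1) else (st.1, st.2.1, st.2.2 + 1)
  else
    if !st.2.1 then (st.1 ++ [line], st.2.1, st.2.2) else (st.1, st.2.1, st.2.2)

lemma foldA_phase2 (ls : List (List Char)) : ∀ (res : List (List Char)) (n : Int), 2 ≤ n →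
    (ls.foldl stepA (res, false, n)).1 = res ++ ls := by
  induction ls with
  | nil => intro res n _; simp
  | cons l ls ih =>
    intro res n hn
    simp only [List.foldl_cons, stepA, delim_eq]
    have h1 : ¬ (n + 1 = 1) := by omega
    have h2 : ¬ (n + 1 = 2) := by omega
    by_cases hd : pyIsDelim l
    · simp only [hd, if_true, h1, if_false, h2, Bool.not_false, if_true]
      rw [ih (res ++ [l]) (n + 1) (by omega)]; simp
    · simp only [hd, Bool.false_eq_true, if_false, Bool.not_false, if_true]
      rw [ih (res ++ [l]) n hn]; simp

lemma foldA_phase1 (ls : List (List Char)) : ∀ (res : List (List Char)),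
    (ls.foldl stepA (res, true, 1)).1 = res ++ refAfter ls := by
  induction ls with
  | nil => intro res; simp [refAfter]
  | cons l ls ih =>
    intro res
    simp only [List.foldl_cons, stepA, delim_eq]
    by_cases hd : pyIsDelim l
    · simp only [hd, if_true]
      norm_num
      rw [foldA_phase2 ls res 2 (by omega)]
      simp [refAfter, hd]
    · simp only [hd, Bool.false_eq_true, if_false, Bool.not_true, if_false]
      rw [ih res]
      simp [refAfter, hd]

lemma foldA_phase0 (ls : List (List Char)) : ∀ (res : List (List Char)),
    (ls.foldl stepA (res, false, 0)).1 = res ++ refBefore ls := by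
  induction ls with
  | nil => intro res; simp [refBefore]
  | cons l ls ih =>
    intro res
    simp only [List.foldl_cons, stepA, delim_eq]
    by_cases hd : pyIsDelim l
    · simp only [hd, if_true]
      norm_num
      rw [foldA_phase1 ls res]
      simp [refBefore, hd]
    · simp only [hd, Bool.false_eq_true, if_false, Bool.not_false, if_true]
      rw [ih (res ++ [l])]
      simp [refBefore, hd]

lemma refAfter_none (ls : List (List Char)) (h : List.findIdx? pyIsDelim ls = none) :
    refAfter ls = [] := by
  induction ls with
  | nil => rfl
  | cons l ls ih =>
    rw [List.findIdx?_cons] at h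
    by_cases hd : pyIsDelim l
    · simp [hd] at h
    · simp only [hd, Bool.false_eq_true, if_false, Option.map_eq_none_iff] at h
      simp [refAfter, hd, ih h]

lemma refAfter_some (ls : List (List Char)) : ∀ (k : Nat),
    List.findIdx? pyIsDelim ls = some k → refAfter ls = ls.drop (k + 1) := by
  induction ls with
  | nil => intro k h; simp at h
  | cons l ls ih =>
    intro k h
    rw [List.findIdx?_cons] at h
    by_cases hd : pyIsDelim l
    · simp [hd] at h
      subst h
      simp [refAfter, hd]
    · simp [hd] at h
      obtain ⟨k', hk', rfl⟩ := h
      simp [refAfter, hd, ih k' hk']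

lemma bLines_eq (ls : List (List Char)) :
    (match List.findIdx? pyIsDelim ls with
     | none => ls
     | some i =>
       match List.findIdx? pyIsDelim (ls.drop (i + 1)) with
       | none => ls.take i
       | some k => ls.take i ++ ls.drop (i + 1 + k + 1)) = refBefore ls := by
  induction ls with
  | nil => simp [refBefore]
  | cons l ls ih =>
    by_cases hd : pyIsDelim l
    · rw [List.findIdx?_cons]
      simp only [hd, if_true]
      simp only [refBefore, hd, if_true]
      cases h2 : List.findIdx? pyIsDelim ((l :: ls).drop (0 + 1)) with
      | none =>
        simp only [List.drop_succ_cons, List.drop_zero] at h2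
        simp [refAfter_none ls h2]
      | some k =>
        simp only [List.drop_succ_cons, List.drop_zero] at h2
        simp only [List.take_zero, List.nil_append]
        rw [refAfter_some ls k h2]
        rw [show 0 + 1 + k + 1 = (k + 1) + 1 from by omega]
        simp
    · rw [List.findIdx?_cons]
      simp only [hd, Bool.false_eq_true, if_false]
      simp only [refBefore, hd, Bool.false_eq_true, if_false]
      cases h1 : List.findIdx? pyIsDelim ls with
      | none => simp [← ih, h1]
      | some i =>
        simp only [Option.map_some]
        have hdrop : (l :: ls).drop (i + 1 + 1) = ls.drop (i + 1) := by simp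
        cases h2 : List.findIdx? pyIsDelim (ls.drop (i + 1)) with
        | none =>
          simp only [hdrop, h2]
          rw [← ih]
          simp [h1, h2, List.take_succ_cons]
        | some k =>
          simp only [hdrop, h2]
          rw [← ih]
          simp only [h1, h2]
          rw [show i + 1 + 1 + k + 1 = (i + 1 + k + 1) + 1 from by omega]
          rw [List.take_succ_cons, List.drop_succ_cons]
          rfl

-- ===== VERDICT (by name: the statement is the Claim_ definition above) =====
theorem strip_header_menu_spec : Claim_equal_strip_header_menu := by
  intro md_text _
  unfold Spec_strip_header_menu strip_header_menu strip_header_menu_alt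
  have hA : ((pySplitlinesKeep md_text.toList).foldl stepA ([], false, 0)).1
      = refBefore (pySplitlinesKeep md_text.toList) := by
    simpa using foldA_phase0 (pySplitlinesKeep md_text.toList) []
  have hB := bLines_eq (pySplitlinesKeep md_text.toList)
  show String.mk (PySem.Chars.join []
      ((pySplitlinesKeep md_text.toList).foldl stepA ([], false, 0)).1) = _
  rw [hA, ← hB]
  cases h1 : List.findIdx? pyIsDelim (pySplitlinesKeep md_text.toList) with
  | none => simp [h1]
  | some i =>
    cases h2 : List.findIdx? pyIsDelim ((pySplitlinesKeep md_text.toList).drop (i + 1)) with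
    | none => simp [h1, h2]
    | some k => simp [h1, h2]
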